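-- pv_equiv track=rewrite | github.com/silver0550/Rendszam-felismeres | tesseract.py | text_filter
-- ===== SOURCE A (Python) =====
-- def text_filter(text):
--     result = ''
--     for letter in text:
--         if letter == '=':
--             result += '-'
--
--         if (letter >='A' and letter <= 'Z') or (letter >='0' and letter <= '9') or letter == '-':
--             result += letter
--
--     return result
-- ===== SOURCE B (Python) =====
-- def text_filter(text):
--     # Divide-and-conquer: split the string in half, filter each half
--     # recursively, and concatenate; single characters are the base case.
--     n = len(text)
--     if n == 0:
--         return ''
--     if n == 1:
--         c = text
--         if c == '=':
--             return '-'
--         if ('A' <= c <= 'Z') or ('0' <= c <= '9') or c == '-':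
--             return c
--         return ''
--     mid = n // 2
--     return text_filter(text[:mid]) + text_filter(text[mid:])
-- ===== Notes on version B (the rewrite author's own statement) =====
-- stated objective: alternative
-- what changed: A's linear accumulator loop with two conditional appends per character is replaced by a divide-and-conquer recursion that splits the string in half, recurses on both halves and concatenates, with a single-character base case deciding '=', keep or drop.
import Mathlib
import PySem

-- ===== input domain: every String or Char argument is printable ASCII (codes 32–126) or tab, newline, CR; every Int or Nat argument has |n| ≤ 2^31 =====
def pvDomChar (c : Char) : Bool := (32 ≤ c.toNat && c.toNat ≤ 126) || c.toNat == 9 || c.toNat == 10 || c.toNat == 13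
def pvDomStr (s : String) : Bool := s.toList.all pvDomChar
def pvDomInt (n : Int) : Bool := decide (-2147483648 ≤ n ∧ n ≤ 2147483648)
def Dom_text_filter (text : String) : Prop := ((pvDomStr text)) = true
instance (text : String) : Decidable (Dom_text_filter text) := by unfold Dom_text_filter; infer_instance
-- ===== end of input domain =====

-- B replaces A's linear accumulator loop by a divide-and-conquer recursion:
-- split in half, recurse on both halves, concatenate; base case = one char.


-- ===== PORT A =====
-- fused loop: for each letter, possibly append '-', then possibly append the letter
def text_filter (text : String) : String :=
  String.ofList (text.toList.foldl (fun result letter =>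
    (if letter = '=' then result ++ ['-'] else result) ++
    (if (('A' ≤ letter ∧ letter ≤ 'Z') ∨ ('0' ≤ letter ∧ letter ≤ '9') ∨ letter = '-')
      then [letter] else [])) [])

-- ===== PORT B =====
-- base case of the recursion: the filtered value of one character
def tfBase (c : Char) : List Char :=
  if c = '=' then ['-']
  else if ('A' ≤ c ∧ c ≤ 'Z') ∨ ('0' ≤ c ∧ c ≤ '9') ∨ c = '-' then [c]
  else []

-- divide and conquer over the character list; text[:mid] / text[mid:] with
-- 0 ≤ mid ≤ len are exactly take/drop (PySem.List.slice_to/slice_from)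
def tfRec (l : List Char) : List Char :=
  if _h : l.length ≤ 1 then
    match l with
    | [] => []
    | c :: _ => tfBase c
  else
    tfRec (l.take (l.length / 2)) ++ tfRec (l.drop (l.length / 2))
termination_by l.length
decreasing_by
  · simp only [List.length_take]; omega
  · simp only [List.length_drop]; omega

def text_filter_alt (text : String) : String :=
  String.ofList (tfRec text.toList)

-- ===== PRECONDITION & SPEC =====
def Spec_text_filter (text : String) (out : String) : Prop := out = text_filter_alt text
instance (text : String) (out : String) : Decidable (Spec_text_filter text out) := by unfold Spec_text_filter; infer_instance

-- ===== CLAIM (what is proved, stated in full; the proofs are below) =====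
def Claim_equal_text_filter : Prop := ∀ (text : String), Dom_text_filter text → Spec_text_filter text (text_filter text)

-- ===== LEMMAS AND PROOFS =====

-- per-character contribution of A's loop body
def tfA (c : Char) : List Char :=
  (if c = '=' then ['-'] else []) ++
  (if ('A' ≤ c ∧ c ≤ 'Z') ∨ ('0' ≤ c ∧ c ≤ '9') ∨ c = '-' then [c] else [])

theorem tfA_eq_base (c : Char) : tfA c = tfBase c := by
  unfold tfA tfBase
  by_cases h : c = '='
  · subst h; decide
  · simp [h]

theorem tf_loop_eq (l : List Char) (acc : List Char) :
    l.foldl (fun result letter =>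
      (if letter = '=' then result ++ ['-'] else result) ++
      (if (('A' ≤ letter ∧ letter ≤ 'Z') ∨ ('0' ≤ letter ∧ letter ≤ '9') ∨ letter = '-')
        then [letter] else [])) acc
    = acc ++ l.flatMap tfA := by
  induction l generalizing acc with
  | nil => simp
  | cons c rest ih =>
    simp only [List.foldl_cons, List.flatMap_cons, ih, tfA]
    by_cases h : c = '=' <;> simp [h]

theorem tfRec_eq (l : List Char) : tfRec l = l.flatMap tfBase := by
  induction hn : l.length using Nat.strong_induction_on generalizing l with
  | _ n ih =>
    subst hn
    by_cases h : l.length ≤ 1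
    · rw [tfRec, dif_pos h]
      match l, h with
      | [], _ => simp
      | [c], _ => simp
    · rw [tfRec, dif_neg h]
      rw [ih (l.take (l.length / 2)).length (by simp; omega) _ rfl,
          ih (l.drop (l.length / 2)).length (by simp; omega) _ rfl,
          ← List.flatMap_append, List.take_append_drop]

-- ===== VERDICT (by name: the statement is the Claim_ definition above) =====
theorem text_filter_spec : Claim_equal_text_filter := by
  intro text _
  unfold Spec_text_filter text_filter text_filter_alt
  rw [tf_loop_eq, tfRec_eq]
  simp [funext tfA_eq_base]
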